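-- pv_equiv track=rewrite | github.com/nastya98eremeeva-beep/bilet | task_generators.py | _fano_shortest
-- ===== SOURCE A (Python) =====
-- def _fano_shortest(code_words: list) -> str:
--     """Кратчайшее новое кодовое слово (Фано): не префикс и не имеет префикса из code_words."""
--     used = set(code_words)
--     for length in range(1, 10):
--         for x in range(2 ** length):
--             w = bin(x)[2:].zfill(length)
--             if w in used:
--                 continue
--             if any(p.startswith(w) for p in used if len(p) > len(w)):
--                 continue
--             if any(w.startswith(p) for p in used):
--                 continue
--             return w
--     return ""
-- ===== SOURCE B (Python) =====
-- def _fano_shortest(code_words: list) -> str: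
--     """Binary-trie version: insert every word (its binary prefix), mark complete
--     binary codewords as ends, then BFS level by level (depth 1..9, '0' before '1');
--     the first missing child of a reachable non-end node is the answer."""
--     root = [False, None, None]  # [is_end, child '0', child '1']
--     for p in code_words:
--         node = root
--         full = True
--         for ch in p:
--             if ch == "0":
--                 if node[1] is None:
--                     node[1] = [False, None, None]
--                 node = node[1]
--             elif ch == "1":
--                 if node[2] is None:
--                     node[2] = [False, None, None]
--                 node = node[2]
--             else:
--                 full = False
--                 break
--         if full:
--             node[0] = True
--     level = [("", root)]
--     for _ in range(9):
--         nxt = []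
--         for path, node in level:
--             if node[0]:
--                 continue
--             if node[1] is None:
--                 return path + "0"
--             nxt.append((path + "0", node[1]))
--             if node[2] is None:
--                 return path + "1"
--             nxt.append((path + "1", node[2]))
--         level = nxt
--     return ""
-- ===== Notes on version B (the rewrite author's own statement) =====
-- stated objective: alternative
-- what changed: Replaces A's per-length enumeration of all 2^L binary words (each checked by scanning every codeword) by building a binary trie of the codewords once and doing a level-order BFS that returns the first missing child of a reachable non-end node.
import Mathlib
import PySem

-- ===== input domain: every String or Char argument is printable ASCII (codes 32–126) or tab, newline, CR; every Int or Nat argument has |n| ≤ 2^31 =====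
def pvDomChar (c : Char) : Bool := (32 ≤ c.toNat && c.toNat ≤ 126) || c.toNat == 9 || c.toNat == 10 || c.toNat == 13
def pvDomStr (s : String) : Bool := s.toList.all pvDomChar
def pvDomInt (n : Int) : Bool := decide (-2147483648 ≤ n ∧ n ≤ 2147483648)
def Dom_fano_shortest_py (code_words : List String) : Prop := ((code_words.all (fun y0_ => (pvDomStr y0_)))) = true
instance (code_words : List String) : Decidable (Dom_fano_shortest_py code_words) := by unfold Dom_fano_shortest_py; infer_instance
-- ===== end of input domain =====

-- B replaces A's per-length brute-force scan over all binary words with a binary trie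
-- plus level-order BFS: the first missing child of a reachable non-end node is the answer.

-- ===== PORT A =====
-- Python '2 ** length': exact for length ≥ 0 (here length ∈ range(1,10))
def pvPow2 (length : Int) : Int := (2 : Int) ^ length.toNat

-- inner loop 'for x in range(2 ** length): …' with its early return
def pvInnerA (used : PySem.Set String) (length : Int) : List Int → Option String
  | [] => none
  | x :: xs =>
    -- w = bin(x)[2:].zfill(length)
    let w : String := PySem.Str.zfill (PySem.Str.slice (PySem.Int.pyBin x) (some 2) none) length
    if PySem.Set.contains used w then pvInnerA used length xs
    else if used.any (fun p => decide (PySem.Str.len p > PySem.Str.len w) && PySem.Str.startswith p w) then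
      pvInnerA used length xs
    else if used.any (fun p => PySem.Str.startswith w p) then pvInnerA used length xs
    else some w

-- outer loop 'for length in range(1, 10): …'
def pvOuterA (used : PySem.Set String) : List Int → Option String
  | [] => none
  | length :: rest =>
    match pvInnerA used length (PySem.List.pyRange 0 (pvPow2 length) 1) with
    | some w => some w
    | none => pvOuterA used rest

def fano_shortest_py (code_words : List String) : String :=
  let used : PySem.Set String := PySem.Set.ofList code_words
  match pvOuterA used (PySem.List.pyRange 1 10 1) with
  | some w => w
  | none => ""

-- ===== PORT B =====
-- trie node [is_end, child '0', child '1']; nil = absent child (Python None)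
inductive BTrie : Type
  | nil : BTrie
  | node : Bool → BTrie → BTrie → BTrie
deriving DecidableEq, Repr

def BTrie.ends : BTrie → Bool
  | .nil => false
  | .node e _ _ => e

def BTrie.left : BTrie → BTrie
  | .nil => .nil
  | .node _ l _ => l

def BTrie.right : BTrie → BTrie
  | .nil => .nil
  | .node _ _ r => r

-- insert one word: walk its binary prefix creating nodes, mark end if fully binary
def pvInsert : BTrie → List Char → BTrie
  | t, [] => .node true t.left t.right
  | t, c :: cs =>
    if c = '0' then .node t.ends (pvInsert t.left cs) t.right
    else if c = '1' then .node t.ends t.left (pvInsert t.right cs)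
    else .node t.ends t.left t.right

def pvBuild (code_words : List String) : BTrie :=
  code_words.foldl (fun t p => pvInsert t p.toList) .nil

-- one BFS level: skip end nodes, return first missing child ('0' before '1'), else collect children
def pvStep : List (List Char × BTrie) → Option (List Char) × List (List Char × BTrie)
  | [] => (none, [])
  | (path, t) :: rest =>
    if t.ends then pvStep rest
    else if t.left = .nil then (some (path ++ ['0']), [])
    else if t.right = .nil then (some (path ++ ['1']), [])
    else
      let (ans, nxt) := pvStep rest
      (ans, (path ++ ['0'], t.left) :: (path ++ ['1'], t.right) :: nxt)

-- 'for _ in range(9)'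
def pvBfs : Nat → List (List Char × BTrie) → Option (List Char)
  | 0, _ => none
  | fuel + 1, level =>
    match pvStep level with
    | (some w, _) => some w
    | (none, nxt) => pvBfs fuel nxt

def fano_shortest_py_alt (code_words : List String) : String :=
  match pvBfs 9 [([], pvBuild code_words)] with
  | some w => String.ofList w
  | none => ""

-- ===== PRECONDITION & SPEC =====
def Spec_fano_shortest_py (code_words : List String) (out : String) : Prop := out = fano_shortest_py_alt code_words
instance (code_words : List String) (out : String) : Decidable (Spec_fano_shortest_py code_words out) := by unfold Spec_fano_shortest_py; infer_instance

-- ===== CLAIM (what is proved, stated in full; the proofs are below) =====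
def Claim_equal_fano_shortest_py : Prop := ∀ (code_words : List String), Dom_fano_shortest_py code_words → Spec_fano_shortest_py code_words (fano_shortest_py code_words)

-- ===== LEMMAS AND PROOFS =====

-- ---- spec-level vocabulary (used only by the proofs) ----
def pvChild (w : List Char) : List (List Char) := [w ++ ['0'], w ++ ['1']]

def pvBinW : Nat → List (List Char)
  | 0 => [[]]
  | k + 1 => (pvBinW k).flatMap pvChild

def pvEx (ws : List (List Char)) (w : List Char) : Bool := ws.any (fun p => w.isPrefixOf p)
def pvEnd (ws : List (List Char)) (w : List Char) : Bool := ws.any (fun p => p == w)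
def pvNPE (ws : List (List Char)) (w : List Char) : Bool :=
  w.inits.all (fun u => (u.length == w.length) || !pvEnd ws u)
def pvGood (ws : List (List Char)) (w : List Char) : Bool :=
  !ws.any (fun p => w.isPrefixOf p || p.isPrefixOf w)
def pvF (ws : List (List Char)) (w : List Char) : Bool :=
  (w.isEmpty || pvEx ws w) && pvNPE ws w
def pvFrontier (ws : List (List Char)) (k : Nat) : List (List Char) :=
  (pvBinW k).filter (pvF ws)
def pvB01 (w : List Char) : Bool := w.all (fun c => c = '0' || c = '1')

-- common reference result: first good word, levels k+1 … k+fuel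
def pvFind (ws : List (List Char)) : Nat → Nat → Option (List Char)
  | _, 0 => none
  | k, fuel + 1 =>
    match (pvBinW (k + 1)).find? (pvGood ws) with
    | some v => some v
    | none => pvFind ws (k + 1) fuel

def pvLook : BTrie → List Char → BTrie
  | t, [] => t
  | t, c :: cs => if c = '0' then pvLook t.left cs else if c = '1' then pvLook t.right cs else .nil

def pvPairs (T : BTrie) (L : List (List Char)) : List (List Char × BTrie) :=
  L.map (fun w => (w, pvLook T w))

def pvPad (L : Nat) (cs : List Char) : List Char := List.replicate (L - cs.length) '0' ++ cs
def pvWordN (L k : Nat) : List Char := pvPad L (Nat.toDigits 2 k)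

-- ---- Nat.toDigits 2 ----
theorem pv_tdc_append (f : Nat) : ∀ (n : Nat) (l : List Char),
    Nat.toDigitsCore 2 f n l = Nat.toDigitsCore 2 f n [] ++ l := by
  induction f with
  | zero => intro n l; simp [Nat.toDigitsCore]
  | succ f ih =>
    intro n l
    simp only [Nat.toDigitsCore]
    by_cases h : n / 2 = 0
    · simp [h]
    · simp only [h, if_false]
      rw [ih (n/2) (Nat.digitChar (n % 2) :: l), ih (n/2) [Nat.digitChar (n % 2)]]
      simp

theorem pv_td_fuel : ∀ (n f g : Nat), n < f → n < g →
    Nat.toDigitsCore 2 f n [] = Nat.toDigitsCore 2 g n [] := by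
  intro n
  induction n using Nat.strong_induction_on with
  | _ n IH =>
    intro f g hf hg
    match f, g with
    | f+1, g+1 =>
      simp only [Nat.toDigitsCore]
      by_cases h : n / 2 = 0
      · simp [h]
      · simp only [h, if_false]
        rw [pv_tdc_append f, pv_tdc_append g]
        have hlt : n / 2 < n := Nat.div_lt_self (by omega) (by omega)
        rw [IH (n/2) hlt f g (by omega) (by omega)]

theorem pv_td_rec (n : Nat) (h : 2 ≤ n) :
    Nat.toDigits 2 n = Nat.toDigits 2 (n / 2) ++ [Nat.digitChar (n % 2)] := by
  have h2 : n / 2 ≠ 0 := by omega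
  simp only [Nat.toDigits, Nat.toDigitsCore, h2, if_false]
  rw [pv_tdc_append n]
  congr 1
  exact pv_td_fuel (n/2) n (n/2+1) (by omega) (by omega)

theorem pv_td_chars (n : Nat) : ∀ c ∈ Nat.toDigits 2 n, c = '0' ∨ c = '1' := by
  induction n using Nat.strong_induction_on with
  | _ n IH =>
    by_cases h : 2 ≤ n
    · rw [pv_td_rec n h]
      intro c hc
      rcases List.mem_append.mp hc with hc | hc
      · exact IH (n/2) (by omega) c hc
      · have : n % 2 = 0 ∨ n % 2 = 1 := by omega
        simp only [List.mem_singleton] at hc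
        rcases this with h0 | h0
        · left; rw [hc, h0]; rfl
        · right; rw [hc, h0]; rfl
    · have h01 : n = 0 ∨ n = 1 := by omega
      rcases h01 with h0 | h0 <;> subst h0
      · have : Nat.toDigits 2 0 = ['0'] := rfl
        rw [this]; intro c hc; simp only [List.mem_singleton] at hc; left; exact hc
      · have : Nat.toDigits 2 1 = ['1'] := rfl
        rw [this]; intro c hc; simp only [List.mem_singleton] at hc; right; exact hc

theorem pv_zfill_eq_pad (cs : List Char) (L : Nat)
    (h : ∀ c ∈ cs, c = '0' ∨ c = '1') :
    PySem.Chars.zfill cs (L : Int) = pvPad L cs := by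
  unfold PySem.Chars.zfill pvPad
  by_cases hle : (L : Int) ≤ (cs.length : Int)
  · have : L - cs.length = 0 := by omega
    simp [hle, this]
  · simp only [hle, if_false]
    match cs with
    | [] => simp
    | c :: rest =>
      have hc := h c (by simp)
      have hns : ¬ (c = '+' ∨ c = '-') := by rcases hc with h0 | h0 <;> subst h0 <;> decide
      simp only [hns, if_false]
      congr 2 <;> omega

theorem pv_word_snoc (L k b : Nat) (hL : 1 ≤ L) (hb : b < 2) :
    pvWordN (L + 1) (2 * k + b) = pvWordN L k ++ [if b = 1 then '1' else '0'] := by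
  by_cases hk : k = 0
  · subst hk
    have hb01 : b = 0 ∨ b = 1 := by omega
    obtain ⟨M, hM⟩ : ∃ M, L = M + 1 := ⟨L - 1, by omega⟩
    subst hM
    rcases hb01 with h0 | h0 <;> subst h0
    · have h1 : Nat.toDigits 2 (2*0+0) = ['0'] := rfl
      simp only [h1, pvWordN, pvPad, if_neg (by omega : ¬ (0:Nat) = 1)]
      simp [List.replicate_succ' (n := M)]
    · have h1 : Nat.toDigits 2 (2*0+1) = ['1'] := rfl
      have h2 : Nat.toDigits 2 0 = ['0'] := rfl
      simp only [h1, h2, pvWordN, pvPad]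
      simp only [List.length_singleton]
      rw [show M + 1 + 1 - 1 = (M + 1 - 1) + 1 by omega, List.replicate_succ' (n := M + 1 - 1)]
      simp
  · have h2k : 2 ≤ 2 * k + b := by omega
    have hdiv : (2 * k + b) / 2 = k := by omega
    have hmod : (2 * k + b) % 2 = b := by omega
    have hrec := pv_td_rec (2 * k + b) h2k
    rw [hdiv, hmod] at hrec
    have hd : Nat.digitChar b = (if b = 1 then '1' else '0') := by
      have : b = 0 ∨ b = 1 := by omega
      rcases this with h0 | h0 <;> subst h0 <;> rfl
    simp only [pvWordN, pvPad, hrec, hd, List.length_append, List.length_singleton]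
    rw [show L + 1 - ((Nat.toDigits 2 k).length + 1) = L - (Nat.toDigits 2 k).length by omega]
    simp [List.append_assoc]

theorem pv_range_double (m : Nat) :
    List.range (2 * m) = (List.range m).flatMap (fun k => [2 * k, 2 * k + 1]) := by
  induction m with
  | zero => rfl
  | succ m ih =>
    rw [show 2 * (m + 1) = (2 * m) + 1 + 1 by omega, List.range_succ, List.range_succ,
        List.range_succ, ih]
    simp

theorem pv_enum (L : Nat) (hL : 1 ≤ L) :
    (List.range (2 ^ L)).map (pvWordN L) = pvBinW L := by
  induction L with
  | zero => omega
  | succ L ih =>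
    by_cases hL1 : L = 0
    · subst hL1
      have : (2:Nat)^1 = 2 := rfl
      rw [this]
      have h0 : pvWordN 1 0 = ['0'] := rfl
      have h1 : pvWordN 1 1 = ['1'] := rfl
      simp [List.range_succ, h0, h1, pvBinW, pvChild]
    · have hL' : 1 ≤ L := by omega
      rw [pow_succ, mul_comm, pv_range_double, List.map_flatMap]
      show (List.range (2^L)).flatMap (fun k => [pvWordN (L+1) (2*k), pvWordN (L+1) (2*k+1)]) = _
      have : ∀ k, [pvWordN (L+1) (2*k), pvWordN (L+1) (2*k+1)] = pvChild (pvWordN L k) := by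
        intro k
        have e0 := pv_word_snoc L k 0 hL' (by omega)
        have e1 := pv_word_snoc L k 1 hL' (by omega)
        simp only [Nat.add_zero] at e0
        rw [e0, e1, pvChild]
        simp
      simp only [this]
      rw [show pvBinW (L+1) = (pvBinW L).flatMap pvChild from rfl, ← ih hL', List.flatMap_map]

theorem pv_binW_b01 (k : Nat) : ∀ w ∈ pvBinW k, pvB01 w = true := by
  induction k with
  | zero => intro w hw; simp [pvBinW] at hw; subst hw; rfl
  | succ k ih =>
    intro w hw
    rw [show pvBinW (k+1) = (pvBinW k).flatMap pvChild from rfl] at hw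
    rcases List.mem_flatMap.mp hw with ⟨u, hu, hw⟩
    have hb := ih u hu
    simp only [pvChild, List.mem_cons] at hw
    rcases hw with h0 | h0
    · subst h0; simp_all [pvB01]
    · rcases h0 with h0 | h0
      · subst h0; simp_all [pvB01]
      · simp at h0

theorem pv_flatMap_if {α β : Type} (L : List α) (f : α → List β) (P : α → Bool) :
    L.flatMap (fun a => if P a then f a else []) = (L.filter P).flatMap f := by
  induction L with
  | nil => rfl
  | cons a L ih =>
    by_cases h : P a = true <;> simp [h, ih]

theorem pv_filter_flatMap {α β : Type} (L : List α) (f : α → List β) (P : α → Bool) (Q : β → Bool)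
    (h : ∀ a ∈ L, P a = false → ∀ b ∈ f a, Q b = false) :
    (L.flatMap f).filter Q = (L.filter P).flatMap (fun a => (f a).filter Q) := by
  induction L with
  | nil => rfl
  | cons a L ih =>
    simp only [List.flatMap_cons, List.filter_append, List.filter_cons,
      ih (fun b hb => h b (by simp [hb]))]
    by_cases hp : P a = true
    · simp [hp]
    · have : (f a).filter Q = [] := by
        apply List.filter_eq_nil_iff.mpr
        intro b hb
        simp [h a (by simp) (by simpa using hp) b hb]
      simp [hp, this]

theorem pv_find?_eq_none_of_all {α : Type} (l : List α) (q : α → Bool)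
    (h : ∀ b ∈ l, q b = false) : l.find? q = none := by
  apply List.find?_eq_none.mpr
  intro b hb
  simp [h b hb]

theorem pv_find?_flatMap_filter {α β : Type} (L : List α) (f : α → List β) (P : α → Bool) (q : β → Bool)
    (h : ∀ a ∈ L, P a = false → ∀ b ∈ f a, q b = false) :
    (L.flatMap f).find? q = ((L.filter P).flatMap f).find? q := by
  induction L with
  | nil => rfl
  | cons a L ih =>
    simp only [List.flatMap_cons, List.filter_cons, List.find?_append,
      ih (fun b hb => h b (by simp [hb]))]
    by_cases hp : P a = true
    · simp [hp]
    · have : (f a).find? q = none := pv_find?_eq_none_of_all _ _ (h a (by simp) (by simpa using hp))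
      simp [hp, this]

theorem pv_end_iff (ws : List (List Char)) (w : List Char) :
    pvEnd ws w = true ↔ w ∈ ws := by
  unfold pvEnd
  rw [List.any_eq_true]
  constructor
  · rintro ⟨p, hp, he⟩
    have : p = w := by simpa using he
    subst this; exact hp
  · intro h; exact ⟨w, h, by simp⟩

theorem pv_ex_iff (ws : List (List Char)) (w : List Char) :
    pvEx ws w = true ↔ ∃ p ∈ ws, w <+: p := by
  unfold pvEx
  rw [List.any_eq_true]
  constructor
  · rintro ⟨p, hp, he⟩; exact ⟨p, hp, List.isPrefixOf_iff_prefix.mp he⟩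
  · rintro ⟨p, hp, he⟩; exact ⟨p, hp, List.isPrefixOf_iff_prefix.mpr he⟩

theorem pv_npe_iff (ws : List (List Char)) (w : List Char) :
    pvNPE ws w = true ↔ ∀ u, u <+: w → u ≠ w → pvEnd ws u = false := by
  unfold pvNPE
  rw [List.all_eq_true]
  constructor
  · intro h u hu hne
    have := h u ((List.mem_inits u w).mpr hu)
    rcases Bool.or_eq_true_iff.mp this with h0 | h0
    · exact absurd (hu.eq_of_length (by simpa using h0)) hne
    · simpa using h0
  · intro h u hm
    by_cases he : u = w
    · subst he; simp
    · simp [h u ((List.mem_inits u w).mp hm) he]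

theorem pv_npe_snoc (ws : List (List Char)) (w : List Char) (b : Char) :
    pvNPE ws (w ++ [b]) = (pvNPE ws w && !pvEnd ws w) := by
  rw [Bool.eq_iff_iff, Bool.and_eq_true, Bool.not_eq_true', pv_npe_iff, pv_npe_iff]
  constructor
  · intro h
    refine ⟨fun u hu hne => h u (hu.trans (List.prefix_append w [b])) ?_, ?_⟩
    · intro he; subst he
      have := hu.length_le
      simp at this
    · exact h w (List.prefix_append w [b]) (by
        intro he
        have := congrArg List.length he
        simp at this)
  · rintro ⟨h1, h2⟩ u hu hne
    rcases (List.prefix_concat_iff).mp hu with h0 | h0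
    · exact absurd h0 hne
    · by_cases he : u = w
      · subst he; exact h2
      · exact h1 u h0 he

theorem pv_good_iff (ws : List (List Char)) (w : List Char) :
    pvGood ws w = (!pvEx ws w && (pvNPE ws w && !pvEnd ws w)) := by
  rw [Bool.eq_iff_iff]
  simp only [Bool.and_eq_true, pvGood, Bool.not_eq_eq_eq_not, Bool.not_true,
    List.any_eq_false]
  rw [pv_npe_iff]
  constructor
  · intro h
    refine ⟨?_, ?_, ?_⟩
    · rw [Bool.eq_false_iff]
      intro hex
      rcases (pv_ex_iff ws w).mp hex with ⟨p, hp, hpre⟩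
      have := h p hp
      simp [List.isPrefixOf_iff_prefix.mpr hpre] at this
    · intro u hu hne
      rw [Bool.eq_false_iff]
      intro hend
      have := h u ((pv_end_iff ws u).mp hend)
      simp [List.isPrefixOf_iff_prefix.mpr hu] at this
    · rw [Bool.eq_false_iff]
      intro hend
      have := h w ((pv_end_iff ws w).mp hend)
      simp at this
  · rintro ⟨hex, hnpe, hend⟩ p hp
    rw [Bool.not_eq_true, Bool.or_eq_false_iff]
    constructor
    · rw [Bool.eq_false_iff]
      intro hpre
      have : pvEx ws w = true := (pv_ex_iff ws w).mpr ⟨p, hp, List.isPrefixOf_iff_prefix.mp hpre⟩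
      rw [this] at hex; simp at hex
    · rw [Bool.eq_false_iff]
      intro hpre
      have hpw : p <+: w := List.isPrefixOf_iff_prefix.mp hpre
      by_cases he : p = w
      · subst he
        rw [(pv_end_iff ws p).mpr hp] at hend; simp at hend
      · have := hnpe p hpw he
        rw [(pv_end_iff ws p).mpr hp] at this; simp at this

theorem pv_ex_snoc_mono (ws : List (List Char)) (w : List Char) (b : Char)
    (h : pvEx ws (w ++ [b]) = true) : pvEx ws w = true := by
  rcases (pv_ex_iff ws _).mp h with ⟨p, hp, hpre⟩
  exact (pv_ex_iff ws w).mpr ⟨p, hp, (List.prefix_append w [b]).trans hpre⟩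

theorem pv_end_ex (ws : List (List Char)) (w : List Char)
    (h : pvEnd ws w = true) : pvEx ws w = true := by
  exact (pv_ex_iff ws w).mpr ⟨w, (pv_end_iff ws w).mp h, List.prefix_refl w⟩

theorem pv_good_child (ws : List (List Char)) (w : List Char) (b : Char)
    (h : pvNPE ws w = true) :
    pvGood ws (w ++ [b]) = (!pvEx ws (w ++ [b]) && !pvEnd ws w) := by
  rw [pv_good_iff, pv_npe_snoc, h]
  by_cases hex : pvEx ws (w ++ [b]) = true
  · simp [hex]
  · have hex' : pvEx ws (w ++ [b]) = false := by simpa using hex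
    have hend' : pvEnd ws (w ++ [b]) = false := by
      rw [Bool.eq_false_iff]
      intro hE
      rw [pv_end_ex ws _ hE] at hex'
      simp at hex'
    simp [hex', hend']

theorem pv_left_node (e : Bool) (l r : BTrie) : (BTrie.node e l r).left = l := rfl

theorem pv_right_node (e : Bool) (l r : BTrie) : (BTrie.node e l r).right = r := rfl

theorem pv_ends_node (e : Bool) (l r : BTrie) : (BTrie.node e l r).ends = e := rfl

theorem pv_node_ne_nil (e : Bool) (l r : BTrie) : BTrie.node e l r ≠ BTrie.nil := by
  intro h; cases h

theorem pv_look_nil : ∀ (w : List Char), pvLook .nil w = .nil := by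
  intro w
  induction w with
  | nil => rfl
  | cons c cs ih =>
    show (if c = '0' then pvLook BTrie.nil.left cs else if c = '1' then pvLook BTrie.nil.right cs else .nil) = .nil
    show (if c = '0' then pvLook .nil cs else if c = '1' then pvLook .nil cs else .nil) = .nil
    split_ifs <;> simp [ih]

theorem pv_look_cons (t : BTrie) (c : Char) (cs : List Char) :
    pvLook t (c :: cs) = (if c = '0' then pvLook t.left cs else if c = '1' then pvLook t.right cs else .nil) := rfl

theorem pv_b01_cons (c : Char) (cs : List Char) (hw : pvB01 (c :: cs) = true) :
    (c = '0' ∨ c = '1') ∧ pvB01 cs = true := by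
  constructor
  · have := (List.all_eq_true.mp hw) c (by simp)
    simpa using this
  · rw [pvB01, List.all_eq_true] at hw ⊢
    exact fun x hx => hw x (by simp [hx])

theorem pv_look_snoc (T : BTrie) (w : List Char) (c : Char) :
    pvLook T (w ++ [c]) =
      (if c = '0' then (pvLook T w).left else if c = '1' then (pvLook T w).right else .nil) := by
  induction w generalizing T with
  | nil =>
    simp only [List.nil_append, pv_look_cons, pvLook]
  | cons d ds ih =>
    simp only [List.cons_append, pv_look_cons]
    by_cases hd : d = '0'
    · simp [hd, ih]
    · by_cases hd1 : d = '1'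
      · simp [hd1, ih]
      · simp only [if_neg hd, if_neg hd1, pv_look_nil]
        split_ifs <;> rfl

theorem pv_look_insert_ne (p w : List Char) (hw : pvB01 w = true) : ∀ (t : BTrie),
    (pvLook (pvInsert t p) w ≠ .nil) ↔ (pvLook t w ≠ .nil ∨ w <+: p) := by
  induction w generalizing p with
  | nil =>
    intro t
    cases p with
    | nil => simp [pvInsert, pvLook, pv_node_ne_nil]
    | cons d ds =>
      simp only [pvInsert, pvLook]
      split_ifs <;> simp [pv_node_ne_nil]
  | cons c cs ih =>
    intro t
    obtain ⟨hc, hcs⟩ := pv_b01_cons c cs hw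
    cases p with
    | nil =>
      rcases hc with h | h <;> subst h <;>
        simp [pvInsert, pv_look_cons, pv_left_node, pv_right_node]
    | cons d ds =>
      rcases hc with h | h <;> subst h <;> by_cases hd : d = '0'
      · subst hd
        simp [pvInsert, pv_look_cons, pv_left_node, List.cons_prefix_cons, ih ds hcs]
      · by_cases hd1 : d = '1' <;>
          simp [pvInsert, hd, hd1, pv_look_cons, pv_left_node, pv_right_node,
            List.cons_prefix_cons, Ne.symm hd, pv_look_nil]
      · subst hd
        simp [pvInsert, pv_look_cons, pv_left_node, pv_right_node, List.cons_prefix_cons]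
      · by_cases hd1 : d = '1'
        · subst hd1
          simp [pvInsert, pv_look_cons, pv_left_node, pv_right_node,
            List.cons_prefix_cons, ih ds hcs]
        · simp [pvInsert, hd, hd1, pv_look_cons, pv_left_node, pv_right_node,
            List.cons_prefix_cons, Ne.symm hd1, pv_look_nil]

theorem pv_look_insert_end (p w : List Char) (hw : pvB01 w = true) : ∀ (t : BTrie),
    ((pvLook (pvInsert t p) w).ends = true) ↔ ((pvLook t w).ends = true ∨ w = p) := by
  induction w generalizing p with
  | nil =>
    intro t
    cases p with
    | nil => simp [pvInsert, pvLook, pv_ends_node]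
    | cons d ds =>
      simp only [pvInsert, pvLook]
      split_ifs <;> simp [pv_ends_node, BTrie.ends]
  | cons c cs ih =>
    intro t
    obtain ⟨hc, hcs⟩ := pv_b01_cons c cs hw
    cases p with
    | nil =>
      rcases hc with h | h <;> subst h <;>
        simp [pvInsert, pv_look_cons, pv_left_node, pv_right_node]
    | cons d ds =>
      rcases hc with h | h <;> subst h <;> by_cases hd : d = '0'
      · subst hd
        simp [pvInsert, pv_look_cons, pv_left_node, ih ds hcs]
      · by_cases hd1 : d = '1' <;>
          simp [pvInsert, hd, hd1, pv_look_cons, pv_left_node, pv_right_node,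
            Ne.symm hd, pv_look_nil]
      · subst hd
        simp [pvInsert, pv_look_cons, pv_left_node, pv_right_node]
      · by_cases hd1 : d = '1'
        · subst hd1
          simp [pvInsert, pv_look_cons, pv_left_node, pv_right_node, ih ds hcs]
        · simp [pvInsert, hd, hd1, pv_look_cons, pv_left_node, pv_right_node,
            Ne.symm hd1, pv_look_nil]

theorem pv_build_aux (w : List Char) (hw : pvB01 w = true) (l : List String) : ∀ (t : BTrie),
    ((pvLook (l.foldl (fun t p => pvInsert t p.toList) t) w ≠ .nil) ↔
      (pvLook t w ≠ .nil ∨ ∃ p ∈ l, w <+: p.toList)) ∧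
    (((pvLook (l.foldl (fun t p => pvInsert t p.toList) t) w).ends = true) ↔
      ((pvLook t w).ends = true ∨ ∃ p ∈ l, w = p.toList)) := by
  induction l with
  | nil => intro t; simp
  | cons q l ih =>
    intro t
    simp only [List.foldl_cons]
    constructor
    · rw [(ih (pvInsert t q.toList)).1, pv_look_insert_ne q.toList w hw t]
      simp only [List.mem_cons]
      constructor
      · rintro ((h | h) | ⟨p, hp, hpre⟩)
        · exact Or.inl h
        · exact Or.inr ⟨q, Or.inl rfl, h⟩
        · exact Or.inr ⟨p, Or.inr hp, hpre⟩
      · rintro (h | ⟨p, (rfl | hp), hpre⟩)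
        · exact Or.inl (Or.inl h)
        · exact Or.inl (Or.inr hpre)
        · exact Or.inr ⟨p, hp, hpre⟩
    · rw [(ih (pvInsert t q.toList)).2, pv_look_insert_end q.toList w hw t]
      simp only [List.mem_cons]
      constructor
      · rintro ((h | h) | ⟨p, hp, hpre⟩)
        · exact Or.inl h
        · exact Or.inr ⟨q, Or.inl rfl, h⟩
        · exact Or.inr ⟨p, Or.inr hp, hpre⟩
      · rintro (h | ⟨p, (rfl | hp), hpre⟩)
        · exact Or.inl (Or.inl h)
        · exact Or.inl (Or.inr hpre)
        · exact Or.inr ⟨p, hp, hpre⟩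

theorem pv_build_ex (cw : List String) (w : List Char) (hw : pvB01 w = true) :
    (pvLook (pvBuild cw) w ≠ .nil) ↔ pvEx (cw.map String.toList) w = true := by
  rw [pvBuild, (pv_build_aux w hw cw .nil).1, pv_look_nil, pv_ex_iff]
  simp

theorem pv_build_end (cw : List String) (w : List Char) (hw : pvB01 w = true) :
    ((pvLook (pvBuild cw) w).ends = true) ↔ pvEnd (cw.map String.toList) w = true := by
  rw [pvBuild, (pv_build_aux w hw cw .nil).2, pv_look_nil, pv_end_iff]
  simp [BTrie.ends, eq_comm]

theorem pv_look_snoc0 (T : BTrie) (w : List Char) : pvLook T (w ++ ['0']) = (pvLook T w).left := by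
  rw [pv_look_snoc]; rfl

theorem pv_look_snoc1 (T : BTrie) (w : List Char) : pvLook T (w ++ ['1']) = (pvLook T w).right := by
  rw [pv_look_snoc]; rfl

theorem pv_step_cons (path : List Char) (t : BTrie) (rest : List (List Char × BTrie)) :
    pvStep ((path, t) :: rest) =
      (if t.ends then pvStep rest
       else if t.left = .nil then (some (path ++ ['0']), [])
       else if t.right = .nil then (some (path ++ ['1']), [])
       else ((pvStep rest).1, (path ++ ['0'], t.left) :: (path ++ ['1'], t.right) :: (pvStep rest).2)) := by
  show pvStep ((path, t) :: rest) = _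
  rfl

theorem pv_step_none (T : BTrie) (L : List (List Char))
    (h : ((L.flatMap (fun w => if (pvLook T w).ends then [] else pvChild w)).find?
            (fun v => pvLook T v == .nil)) = none) :
    pvStep (pvPairs T L) =
      (none, pvPairs T (L.flatMap (fun w => if (pvLook T w).ends then [] else pvChild w))) := by
  induction L with
  | nil => rfl
  | cons w rest ih =>
    simp only [List.flatMap_cons] at h ⊢
    simp only [pvPairs, List.map_cons] at ih ⊢
    rw [pv_step_cons]
    by_cases he : (pvLook T w).ends
    · simp only [he, if_true] at h ⊢
      simp only [List.nil_append] at h ⊢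
      exact ih h
    · simp only [he, if_false] at h ⊢
      rw [List.find?_append] at h
      have h1 : (pvChild w).find? (fun v => pvLook T v == .nil) = none := by
        cases hfa : (pvChild w).find? (fun v => pvLook T v == .nil) <;> simp [hfa] at h ⊢
      have h2 : (rest.flatMap (fun w => if (pvLook T w).ends then [] else pvChild w)).find?
          (fun v => pvLook T v == .nil) = none := by
        cases hfa : (rest.flatMap (fun w => if (pvLook T w).ends then [] else pvChild w)).find?
            (fun v => pvLook T v == .nil) <;> simp [hfa] at h ⊢
      have hl : ¬ ((pvLook T w).left = .nil) := by
        have := List.find?_eq_none.mp h1 (w ++ ['0']) (by simp [pvChild])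
        simpa [pv_look_snoc0] using this
      have hr : ¬ ((pvLook T w).right = .nil) := by
        have := List.find?_eq_none.mp h1 (w ++ ['1']) (by simp [pvChild])
        simpa [pv_look_snoc1] using this
      simp only [hl, hr, if_false, if_neg hl, if_neg hr]
      rw [ih h2]
      simp [pvChild, pv_look_snoc0, pv_look_snoc1, Bool.not_eq_true]

theorem pv_step_some (T : BTrie) (L : List (List Char)) (v : List Char)
    (h : ((L.flatMap (fun w => if (pvLook T w).ends then [] else pvChild w)).find?
            (fun v => pvLook T v == .nil)) = some v) :
    (pvStep (pvPairs T L)).1 = some v := by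
  induction L with
  | nil => simp at h
  | cons w rest ih =>
    simp only [List.flatMap_cons] at h
    simp only [pvPairs, List.map_cons] at ih ⊢
    rw [pv_step_cons]
    by_cases he : (pvLook T w).ends
    · simp only [he, if_true] at h ⊢
      simp only [List.nil_append] at h
      exact ih h
    · rw [Bool.not_eq_true] at he
      simp only [he, Bool.false_eq_true, if_false] at h ⊢
      rw [List.find?_append] at h
      by_cases hl : (pvLook T w).left = .nil
      · have : (pvChild w).find? (fun v => pvLook T v == .nil) = some (w ++ ['0']) := by
          simp [pvChild, List.find?_cons, pv_look_snoc0, hl]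
        rw [this] at h
        simp only [Option.some_or] at h
        cases h
        simp [hl]
      · by_cases hr : (pvLook T w).right = .nil
        · have : (pvChild w).find? (fun v => pvLook T v == .nil) = some (w ++ ['1']) := by
            simp [pvChild, List.find?_cons, pv_look_snoc0, pv_look_snoc1, hl, hr]
          rw [this] at h
          simp only [Option.some_or] at h
          cases h
          simp [hl, hr]
        · have : (pvChild w).find? (fun v => pvLook T v == .nil) = none := by
            simp [pvChild, List.find?_cons, pv_look_snoc0, pv_look_snoc1, hl, hr]
          rw [this] at h
          simp only [Option.none_or] at h
          simp only [if_neg hl, if_neg hr]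
          exact ih h

theorem pv_find?_congr {α : Type} (L : List α) (p q : α → Bool)
    (h : ∀ a ∈ L, p a = q a) : L.find? p = L.find? q := by
  induction L with
  | nil => rfl
  | cons a L ih =>
    simp only [List.find?_cons]
    rw [h a (by simp)]
    by_cases hq : q a = true
    · simp [hq]
    · simp only [(by simpa using hq : q a = false)]
      exact ih (fun b hb => h b (by simp [hb]))

theorem pv_mem_child (v w : List Char) (h : v ∈ pvChild w) : ∃ b, v = w ++ [b] := by
  simp only [pvChild, List.mem_cons, List.mem_singleton] at h
  rcases h with h | h
  · exact ⟨'0', h⟩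
  · rcases h with h | h
    · exact ⟨'1', h⟩
    · simp at h

theorem pv_flatMap_congr_mem {α β : Type} (L : List α) (f g : α → List β)
    (h : ∀ a ∈ L, f a = g a) : L.flatMap f = L.flatMap g := by
  induction L with
  | nil => rfl
  | cons a L ih =>
    simp only [List.flatMap_cons]
    rw [h a (by simp), ih (fun b hb => h b (by simp [hb]))]

theorem pv_frontier_npe (ws : List (List Char)) (k : Nat) (w : List Char)
    (h : w ∈ pvFrontier ws k) : pvNPE ws w = true ∧ w ∈ pvBinW k := by
  rw [pvFrontier, List.mem_filter] at h
  refine ⟨?_, h.1⟩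
  have h2 := h.2
  rw [pvF] at h2
  exact (Bool.and_eq_true_iff.mp h2).2

-- children of bad parents are not good (given no good at level k)

theorem pv_bad_parent (ws : List (List Char)) (k : Nat)
    (hk : ∀ w ∈ pvBinW k, pvGood ws w = false) :
    ∀ w ∈ pvBinW k, pvF ws w = false → ∀ v ∈ pvChild w, pvGood ws v = false := by
  intro w hwmem hF v hv
  obtain ⟨b, rfl⟩ := pv_mem_child v w hv
  rw [pvF, Bool.and_eq_false_iff] at hF
  rcases hF with hF | hF
  · -- w nonempty and not existing: w itself would be good, contradicting hk
    rw [Bool.or_eq_false_iff] at hF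
    obtain ⟨hne, hex⟩ := hF
    by_cases hnpe : pvNPE ws w = true
    · exfalso
      have hend : pvEnd ws w = false := by
        rw [Bool.eq_false_iff]
        intro hE
        rw [pv_end_ex ws w hE] at hex
        simp at hex
      have : pvGood ws w = true := by
        rw [pv_good_iff, hex, hnpe, hend]
        rfl
      rw [hk w hwmem] at this
      simp at this
    · have hnpe' : pvNPE ws w = false := by simpa using hnpe
      rw [pv_good_iff, pv_npe_snoc, hnpe']
      simp
  · rw [pv_good_iff, pv_npe_snoc, hF]
    simp

theorem pv_chain (cw : List String) (k : Nat)
    (hk : ∀ w ∈ pvBinW k, pvGood (cw.map String.toList) w = false) :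
    (pvBinW (k+1)).find? (pvGood (cw.map String.toList)) =
      (((pvFrontier (cw.map String.toList) k).flatMap
          (fun w => if (pvLook (pvBuild cw) w).ends then [] else pvChild w)).find?
        (fun v => pvLook (pvBuild cw) v == .nil)) := by
  set ws := cw.map String.toList with hws
  set T := pvBuild cw with hT
  -- step 1: restrict to frontier
  have h1 : (pvBinW (k+1)).find? (pvGood ws) = ((pvFrontier ws k).flatMap pvChild).find? (pvGood ws) := by
    show ((pvBinW k).flatMap pvChild).find? (pvGood ws) = _
    exact pv_find?_flatMap_filter (pvBinW k) pvChild (pvF ws) (pvGood ws) (pv_bad_parent ws k hk)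
  -- step 2: drop children of end nodes
  have h2 : ((pvFrontier ws k).flatMap pvChild).find? (pvGood ws) =
      ((pvFrontier ws k).flatMap (fun w => if (pvLook T w).ends then [] else pvChild w)).find? (pvGood ws) := by
    have heq := pv_find?_flatMap_filter (pvFrontier ws k) pvChild (fun w => !(pvLook T w).ends) (pvGood ws) ?_
    · rw [heq, ← pv_flatMap_if]
      have hfun : (fun a => if (!(pvLook T a).ends) = true then pvChild a else []) =
          (fun w => if (pvLook T w).ends = true then [] else pvChild w) := by
        funext a
        by_cases he : (pvLook T a).ends <;> simp [he]
      rw [hfun]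
    · intro w hw hP v hv
      obtain ⟨hnpe, hmem⟩ := pv_frontier_npe ws k w hw
      obtain ⟨b, rfl⟩ := pv_mem_child v w hv
      have hend : pvEnd ws w = true := by
        rw [← pv_build_end cw w (pv_binW_b01 k w hmem)]
        simpa using hP
      rw [pv_good_child ws w b hnpe, hend]
      simp
  -- step 3: on the remaining children, good = "missing in trie"
  have h3 : ((pvFrontier ws k).flatMap (fun w => if (pvLook T w).ends then [] else pvChild w)).find? (pvGood ws) =
      ((pvFrontier ws k).flatMap (fun w => if (pvLook T w).ends then [] else pvChild w)).find?
        (fun v => pvLook T v == .nil) := by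
    apply pv_find?_congr
    intro v hv
    rcases List.mem_flatMap.mp hv with ⟨w, hw, hvw⟩
    obtain ⟨hnpe, hmem⟩ := pv_frontier_npe ws k w hw
    by_cases he : (pvLook T w).ends
    · simp [he] at hvw
    · simp only [he, Bool.false_eq_true, if_false] at hvw
      obtain ⟨b, rfl⟩ := pv_mem_child _ w hvw
      have hb01 : pvB01 (w ++ [b]) = true := by
        have := pv_binW_b01 (k+1) (w ++ [b]) ?_
        · exact this
        · show w ++ [b] ∈ (pvBinW k).flatMap pvChild
          exact List.mem_flatMap.mpr ⟨w, hmem, hvw⟩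
      have hend : pvEnd ws w = false := by
        rw [← Bool.not_eq_true, ← pv_build_end cw w (pv_binW_b01 k w hmem)]
        simpa using he
      rw [pv_good_child ws w b hnpe, hend]
      by_cases hnil : pvLook T (w ++ [b]) = .nil
      · have : pvEx ws (w ++ [b]) = false := by
          rw [Bool.eq_false_iff]
          intro hE
          exact ((pv_build_ex cw _ hb01).mpr hE) hnil
        simp [hnil, this]
      · have : pvEx ws (w ++ [b]) = true := (pv_build_ex cw _ hb01).mp hnil
        simp [this, hnil]
  rw [h1, h2, h3]

theorem pv_frontier_succ (cw : List String) (k : Nat)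
    (hnone : ((pvFrontier (cw.map String.toList) k).flatMap
        (fun w => if (pvLook (pvBuild cw) w).ends then [] else pvChild w)).find?
        (fun v => pvLook (pvBuild cw) v == .nil) = none) :
    (pvFrontier (cw.map String.toList) k).flatMap
        (fun w => if (pvLook (pvBuild cw) w).ends then [] else pvChild w) =
      pvFrontier (cw.map String.toList) (k+1) := by
  set ws := cw.map String.toList with hws
  set T := pvBuild cw with hT
  have hall : ∀ v ∈ (pvFrontier ws k).flatMap
      (fun w => if (pvLook T w).ends then [] else pvChild w), pvLook T v ≠ .nil := by
    intro v hv
    have := List.find?_eq_none.mp hnone v hv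
    simpa using this
  have hstep : pvFrontier ws (k+1) = (pvFrontier ws k).flatMap (fun w => (pvChild w).filter (pvF ws)) := by
    show ((pvBinW k).flatMap pvChild).filter (pvF ws) = _
    apply pv_filter_flatMap
    intro w hw hF v hv
    obtain ⟨b, rfl⟩ := pv_mem_child v w hv
    rw [pvF, Bool.and_eq_false_iff] at hF
    rcases hF with hF | hF
    · rw [Bool.or_eq_false_iff] at hF
      obtain ⟨hne, hex⟩ := hF
      rw [pvF, Bool.and_eq_false_iff]
      left
      rw [Bool.or_eq_false_iff]
      refine ⟨by simp, ?_⟩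
      rw [Bool.eq_false_iff]
      intro hE
      rw [pv_ex_snoc_mono ws w b hE] at hex
      simp at hex
    · rw [pvF, Bool.and_eq_false_iff]
      right
      rw [pv_npe_snoc, hF]
      simp
  rw [hstep]
  apply pv_flatMap_congr_mem
  intro w hw
  obtain ⟨hnpe, hmem⟩ := pv_frontier_npe ws k w hw
  by_cases he : (pvLook T w).ends
  · have hend : pvEnd ws w = true := (pv_build_end cw w (pv_binW_b01 k w hmem)).mp he
    simp only [he, if_true]
    symm
    rw [List.filter_eq_nil_iff]
    intro v hv
    obtain ⟨b, rfl⟩ := pv_mem_child v w hv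
    rw [pvF, pv_npe_snoc, hend]
    simp
  · have hend : pvEnd ws w = false := by
      rw [← Bool.not_eq_true, ← pv_build_end cw w (pv_binW_b01 k w hmem)]
      simpa using he
    simp only [he, Bool.false_eq_true, if_false]
    symm
    rw [List.filter_eq_self]
    intro v hv
    obtain ⟨b, rfl⟩ := pv_mem_child v w hv
    have hvs : w ++ [b] ∈ (pvFrontier ws k).flatMap
        (fun w => if (pvLook T w).ends then [] else pvChild w) := by
      apply List.mem_flatMap.mpr
      exact ⟨w, hw, by simp [he, hv]⟩
    have hnn : pvLook T (w ++ [b]) ≠ .nil := hall _ hvs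
    have hb01 : pvB01 (w ++ [b]) = true := by
      apply pv_binW_b01 (k+1)
      show w ++ [b] ∈ (pvBinW k).flatMap pvChild
      exact List.mem_flatMap.mpr ⟨w, hmem, hv⟩
    have hex : pvEx ws (w ++ [b]) = true := (pv_build_ex cw _ hb01).mp hnn
    rw [pvF, pv_npe_snoc, hnpe, hend, hex]
    simp

theorem pv_B_main (cw : List String) (fuel : Nat) : ∀ (k : Nat),
    (∀ w ∈ pvBinW k, pvGood (cw.map String.toList) w = false) →
    pvBfs fuel (pvPairs (pvBuild cw) (pvFrontier (cw.map String.toList) k)) =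
      pvFind (cw.map String.toList) k fuel := by
  induction fuel with
  | zero => intro k _; rfl
  | succ fuel ih =>
    intro k hk
    have hchain := pv_chain cw k hk
    show pvBfs (fuel + 1) _ = _
    cases hf : (pvBinW (k+1)).find? (pvGood (cw.map String.toList)) with
    | some v =>
      have hs : (pvStep (pvPairs (pvBuild cw) (pvFrontier (cw.map String.toList) k))).1 = some v :=
        pv_step_some _ _ v (hchain ▸ hf)
      rcases hstep : pvStep (pvPairs (pvBuild cw) (pvFrontier (cw.map String.toList) k)) with ⟨a1, a2⟩
      rw [hstep] at hs
      simp only at hs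
      subst hs
      rw [pvBfs, hstep]
      rw [pvFind, hf]
    | none =>
      have hs := pv_step_none (pvBuild cw) (pvFrontier (cw.map String.toList) k) (hchain ▸ hf)
      rw [pvBfs, hs]
      rw [pv_frontier_succ cw k (hchain ▸ hf)]
      rw [pvFind, hf]
      apply ih
      intro w hw
      have := List.find?_eq_none.mp hf w hw
      simpa using this

theorem pv_word_str (L k : Nat) :
    PySem.Str.zfill (PySem.Str.slice (PySem.Int.pyBin ((k : Nat) : Int)) (some 2) none) ((L : Nat) : Int) =
      String.ofList (pvWordN L k) := by
  apply String.toList_inj.mp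
  rw [PySem.Str.toList_zfill, PySem.Str.toList_slice, PySem.Int.toList_pyBin]
  have h0b : PySem.Int.toBinChars0b ((k : Nat) : Int) = '0' :: 'b' :: Nat.toDigits 2 k := by
    unfold PySem.Int.toBinChars0b
    rw [if_neg (by omega)]
    simp
  rw [h0b]
  have hsl : PySem.Chars.slice ('0' :: 'b' :: Nat.toDigits 2 k) (some 2) none =
      Nat.toDigits 2 k := by
    show PySem.List.slice _ (some 2) none = _
    rw [PySem.List.slice_from _ (by omega : (0:Int) ≤ 2)]
    rfl
  rw [hsl, pv_zfill_eq_pad _ L (pv_td_chars k)]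
  simp [pvWordN]

-- the three checks of A versus pvGood

theorem pv_check (cw : List String) (v : List Char) :
    (PySem.Set.contains (PySem.Set.ofList cw) (String.ofList v) = false ∧
     (PySem.Set.ofList cw).any (fun p => decide (PySem.Str.len p > PySem.Str.len (String.ofList v)) &&
        PySem.Str.startswith p (String.ofList v)) = false ∧
     (PySem.Set.ofList cw).any (fun p => PySem.Str.startswith (String.ofList v) p) = false) ↔
    pvGood (cw.map String.toList) v = true := by
  have hmem : ∀ p, p ∈ PySem.Set.ofList cw ↔ p ∈ cw := fun p => PySem.Set.mem_ofList cw p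
  constructor
  · rintro ⟨h1, h2, h3⟩
    rw [pvGood, Bool.not_eq_eq_eq_not, Bool.not_true, List.any_eq_false]
    rintro p hp
    rw [List.mem_map] at hp
    obtain ⟨q, hq, rfl⟩ := hp
    rw [Bool.not_eq_true, Bool.or_eq_false_iff]
    constructor
    · rw [Bool.eq_false_iff]
      intro hpre
      have hvq : v <+: q.toList := List.isPrefixOf_iff_prefix.mp hpre
      by_cases hlen : v.length = q.toList.length
      · have : v = q.toList := hvq.eq_of_length hlen
        have hq' : String.ofList v ∈ PySem.Set.ofList cw := by
          rw [hmem]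
          rw [← String.ofList_toList (s := q), ← this] at hq
          exact hq
        rw [PySem.Set.contains, List.contains_eq_mem, decide_eq_false_iff_not] at h1
        exact h1 hq'
      · have hlt : v.length < q.toList.length := by
          have := hvq.length_le
          omega
        rw [List.any_eq_false] at h2
        have := h2 q ((hmem q).mpr hq)
        rw [Bool.not_eq_true, Bool.and_eq_false_iff] at this
        rcases this with h0 | h0
        · rw [decide_eq_false_iff_not] at h0
          apply h0
          rw [PySem.Str.len_eq, PySem.Str.len_eq]
          have hv : (String.ofList v).toList = v := String.toList_ofList (l := v)
          rw [hv]
          exact_mod_cast hlt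
        · rw [PySem.Str.startswith_eq, PySem.Chars.startswith] at h0
          rw [String.toList_ofList] at h0
          rw [hpre] at h0
          simp at h0
    · rw [Bool.eq_false_iff]
      intro hpre
      rw [List.any_eq_false] at h3
      have := h3 q ((hmem q).mpr hq)
      rw [PySem.Str.startswith_eq, PySem.Chars.startswith, String.toList_ofList] at this
      rw [hpre] at this
      simp at this
  · intro hg
    rw [pvGood, Bool.not_eq_eq_eq_not, Bool.not_true, List.any_eq_false] at hg
    refine ⟨?_, ?_, ?_⟩
    · rw [PySem.Set.contains, List.contains_eq_mem, decide_eq_false_iff_not]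
      intro hv
      have hv' : String.ofList v ∈ cw := (hmem _).mp hv
      have := hg (String.ofList v).toList (List.mem_map.mpr ⟨_, hv', rfl⟩)
      rw [String.toList_ofList] at this
      simp [List.isPrefixOf_iff_prefix] at this
    · rw [List.any_eq_false]
      intro p hp
      have hp' := (hmem p).mp hp
      have := hg p.toList (List.mem_map.mpr ⟨_, hp', rfl⟩)
      rw [Bool.not_eq_true, Bool.or_eq_false_iff] at this
      rw [Bool.not_eq_true, Bool.and_eq_false_iff]
      right
      rw [PySem.Str.startswith_eq, PySem.Chars.startswith, String.toList_ofList]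
      exact this.1
    · rw [List.any_eq_false]
      intro p hp
      have hp' := (hmem p).mp hp
      have := hg p.toList (List.mem_map.mpr ⟨_, hp', rfl⟩)
      rw [Bool.not_eq_true, Bool.or_eq_false_iff] at this
      rw [Bool.not_eq_true, PySem.Str.startswith_eq, PySem.Chars.startswith, String.toList_ofList]
      exact this.2

theorem pv_inner_gen (cw : List String) (L : Nat) (xs : List Nat) :
    pvInnerA (PySem.Set.ofList cw) ((L : Nat) : Int) (xs.map (fun k => ((k : Nat) : Int))) =
      ((xs.map (pvWordN L)).find? (pvGood (cw.map String.toList))).map String.ofList := by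
  induction xs with
  | nil => rfl
  | cons x xs ih =>
    rw [List.map_cons, List.map_cons, List.find?_cons]
    show (if PySem.Set.contains _ _ then _ else if _ then _ else if _ then _ else _) = _
    rw [pv_word_str L x]
    by_cases hg : pvGood (cw.map String.toList) (pvWordN L x) = true
    · have h3 := (pv_check cw (pvWordN L x)).mpr hg
      rw [h3.1, h3.2.1, h3.2.2]
      simp [hg]
    · have hg' : pvGood (cw.map String.toList) (pvWordN L x) = false := by simpa using hg
      rw [hg']
      by_cases h1 : PySem.Set.contains (PySem.Set.ofList cw) (String.ofList (pvWordN L x)) = true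
      · simp only [h1, if_true]
        exact ih
      · rw [Bool.not_eq_true] at h1
        simp only [h1, Bool.false_eq_true, if_false]
        by_cases h2 : (PySem.Set.ofList cw).any (fun p => decide (PySem.Str.len p > PySem.Str.len (String.ofList (pvWordN L x))) &&
            PySem.Str.startswith p (String.ofList (pvWordN L x))) = true
        · simp only [h2, if_true]
          exact ih
        · rw [Bool.not_eq_true] at h2
          simp only [h2, Bool.false_eq_true, if_false]
          by_cases h3 : (PySem.Set.ofList cw).any (fun p => PySem.Str.startswith (String.ofList (pvWordN L x)) p) = true
          · simp only [h3, if_true]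
            exact ih
          · rw [Bool.not_eq_true] at h3
            exfalso
            have := (pv_check cw (pvWordN L x)).mp ⟨h1, h2, h3⟩
            rw [hg'] at this
            simp at this

theorem pv_A_inner (cw : List String) (L : Nat) (hL : 1 ≤ L) :
    pvInnerA (PySem.Set.ofList cw) ((L : Nat) : Int) (PySem.List.pyRange 0 (pvPow2 ((L : Nat) : Int)) 1) =
      ((pvBinW L).find? (pvGood (cw.map String.toList))).map String.ofList := by
  have hr : PySem.List.pyRange 0 (pvPow2 ((L : Nat) : Int)) 1 =
      (List.range (2 ^ L)).map (fun k => ((k : Nat) : Int)) := by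
    rw [show (1 : Int) = (1 : Int) from rfl]
    rw [PySem.List.pyRange_one]
    have : (pvPow2 ((L : Nat) : Int) - 0).toNat = 2 ^ L := by
      unfold pvPow2
      rw [Int.toNat_natCast, sub_zero]
      rw [show ((2:Int) ^ L) = (((2 ^ L : Nat) : Int)) by push_cast; ring]
      rw [Int.toNat_natCast]
    rw [this]
    apply List.map_congr_left
    intro k hk
    omega
  rw [hr, pv_inner_gen cw L, pv_enum L hL]

theorem pv_A_outer (cw : List String) (fuel : Nat) : ∀ (k : Nat),
    pvOuterA (PySem.Set.ofList cw) ((List.range fuel).map (fun i => ((k + 1 + i : Nat) : Int))) =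
      (pvFind (cw.map String.toList) k fuel).map String.ofList := by
  induction fuel with
  | zero => intro k; rfl
  | succ fuel ih =>
    intro k
    have hshift : (List.range (fuel + 1)).map (fun i => ((k + 1 + i : Nat) : Int)) =
        ((k + 1 : Nat) : Int) :: (List.range fuel).map (fun i => ((k + 2 + i : Nat) : Int)) := by
      rw [List.range_succ_eq_map]
      simp only [List.map_cons, List.map_map]
      congr 1
      apply List.map_congr_left
      intro i _
      simp only [Function.comp_apply]
      congr 1
      omega
    rw [hshift]
    show (match pvInnerA _ _ _ with
          | some w => some w
          | none => pvOuterA _ _) = _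
    rw [pv_A_inner cw (k+1) (by omega)]
    rw [pvFind]
    cases hf : (pvBinW (k + 1)).find? (pvGood (cw.map String.toList)) with
    | some v => simp [hf]
    | none =>
      simp only [hf, Option.map_none]
      exact ih (k + 1)


-- ===== VERDICT (by name: the statement is the Claim_ definition above) =====
theorem fano_shortest_py_spec : Claim_equal_fano_shortest_py := by
  intro cw _hdom
  show fano_shortest_py cw = fano_shortest_py_alt cw
  by_cases hcw : cw = []
  · subst hcw; decide
  · have hA : fano_shortest_py cw =
        (match (pvFind (cw.map String.toList) 0 9).map String.ofList with
         | some w => w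
         | none => "") := by
      show (match pvOuterA (PySem.Set.ofList cw) (PySem.List.pyRange 1 10 1) with
            | some w => w | none => "") = _
      have hr : PySem.List.pyRange 1 10 1 =
          (List.range 9).map (fun i => ((0 + 1 + i : Nat) : Int)) := by decide
      rw [hr, pv_A_outer cw 9 0]
    have hk0 : ∀ w ∈ pvBinW 0, pvGood (cw.map String.toList) w = false := by
      intro w hw
      simp only [pvBinW, List.mem_singleton] at hw
      subst hw
      cases cw with
      | nil => exact absurd rfl hcw
      | cons q rest => simp [pvGood, List.isPrefixOf]
    have hfr : pvFrontier (cw.map String.toList) 0 = [[]] := rfl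
    have hB : fano_shortest_py_alt cw =
        (match pvFind (cw.map String.toList) 0 9 with
         | some w => String.ofList w
         | none => "") := by
      show (match pvBfs 9 [([], pvBuild cw)] with
            | some w => String.ofList w | none => "") = _
      have hlevel : [(([] : List Char), pvBuild cw)] =
          pvPairs (pvBuild cw) (pvFrontier (cw.map String.toList) 0) := by
        rw [hfr]; rfl
      rw [hlevel, pv_B_main cw 9 0 hk0]
    rw [hA, hB]
    cases pvFind (cw.map String.toList) 0 9 <;> simp
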